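-- pv_equiv track=rewrite | github.com/s1r-J/jinmei-dict | scripts/jinmei-dict.py | create_itaiji_name
-- ===== SOURCE A (Python) =====
-- import itertools
--
-- def create_itaiji_name(kaki, itaiji):
--     moji_list = []
--     for k in kaki:
--         l = [k]
--         if k in itaiji:
--             l.extend(itaiji[k])
--         moji_list.append(l)
--     kari_list = list(itertools.product(*moji_list))
--     all_kaki = [kaki]
--     for kari in kari_list:
--         all_kaki.append(''.join(kari))
--     return all_kaki
-- ===== SOURCE B (Python) =====
-- def create_itaiji_name(kaki, itaiji):
--     # Arithmetic enumeration: count the total number of variant combinations and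
--     # decode each index i as mixed-radix digits (last position fastest, matching
--     # itertools.product order), picking one variant per position.
--     opts = [[k] + list(itaiji.get(k, [])) for k in kaki]
--     total = 1
--     for o in opts:
--         total *= len(o)
--     all_kaki = [kaki]
--     for i in range(total):
--         rem = i
--         chars = []
--         for o in reversed(opts):
--             rem, d = divmod(rem, len(o))
--             chars.append(o[d])
--         all_kaki.append(''.join(reversed(chars)))
--     return all_kaki
-- ===== Notes on version B (the rewrite author's own statement) =====
-- stated objective: alternative
-- what changed: B replaces itertools.product enumeration of per-character variant lists with arithmetic: it counts the total number of combinations and decodes each index 0..total-1 as mixed-radix digits (last position fastest), selecting one variant per position.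
import Mathlib
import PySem

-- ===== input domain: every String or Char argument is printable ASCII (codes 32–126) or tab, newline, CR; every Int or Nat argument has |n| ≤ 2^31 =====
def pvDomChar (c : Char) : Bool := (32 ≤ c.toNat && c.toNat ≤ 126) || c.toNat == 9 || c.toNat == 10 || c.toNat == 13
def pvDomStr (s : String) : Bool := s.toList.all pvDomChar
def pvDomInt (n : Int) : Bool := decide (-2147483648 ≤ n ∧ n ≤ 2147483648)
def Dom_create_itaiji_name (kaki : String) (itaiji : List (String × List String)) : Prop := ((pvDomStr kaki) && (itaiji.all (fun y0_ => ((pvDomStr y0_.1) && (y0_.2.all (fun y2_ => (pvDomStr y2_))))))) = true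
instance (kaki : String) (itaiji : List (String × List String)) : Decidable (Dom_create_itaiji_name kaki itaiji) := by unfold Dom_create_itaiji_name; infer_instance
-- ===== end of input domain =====

-- B replaces itertools.product enumeration with arithmetic: it counts the total number of
-- variant combinations and decodes each index into mixed-radix digits (objective: alternative).

-- ===== PORT A =====
-- itertools.product(*moji_list): first list varies slowest, exactly this recursion
def pvProduct (ls : List (List String)) : List (List String) :=
  match ls with
  | [] => [[]]
  | l :: rest => l.flatMap (fun x => (pvProduct rest).map (fun t => x :: t))

def create_itaiji_name (kaki : String) (itaiji : List (String × List String)) : List String :=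
  let moji_list := kaki.toList.map (fun k =>
    k.toString :: ((itaiji.lookup k.toString).getD []))
  let kari_list := pvProduct moji_list
  kaki :: kari_list.map (fun kari => String.join kari)

-- ===== PORT B =====
-- inner loop 'for o in reversed(opts): rem, d = divmod(rem, len(o)); chars.append(o[d])';
-- every o here has length ≥ 1 (it starts with [k]), so divmod never divides by 0 and
-- o[d] with d = rem % len(o) is always in range ('.getD "" ' is exact on the reachable inputs)
def pvDecodeStep (st : Nat × List String) (o : List String) : Nat × List String :=
  (st.1 / o.length, st.2 ++ [o.getD (st.1 % o.length) ""])

def create_itaiji_name_alt (kaki : String) (itaiji : List (String × List String)) : List String :=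
  let opts := kaki.toList.map (fun k =>
    k.toString :: ((itaiji.lookup k.toString).getD []))
  let total := opts.foldl (fun a o => a * o.length) 1
  kaki :: (List.range total).map (fun i =>
    let st := opts.reverse.foldl pvDecodeStep (i, [])
    String.join st.2.reverse)

-- ===== PRECONDITION & SPEC =====
def Spec_create_itaiji_name (kaki : String) (itaiji : List (String × List String)) (out : List String) : Prop := out = create_itaiji_name_alt kaki itaiji
instance (kaki : String) (itaiji : List (String × List String)) (out : List String) : Decidable (Spec_create_itaiji_name kaki itaiji out) := by unfold Spec_create_itaiji_name; infer_instance

-- ===== CLAIM (what is proved, stated in full; the proofs are below) =====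
def Claim_equal_create_itaiji_name : Prop := ∀ (kaki : String) (itaiji : List (String × List String)), Dom_create_itaiji_name kaki itaiji → Spec_create_itaiji_name kaki itaiji (create_itaiji_name kaki itaiji)

-- ===== LEMMAS AND PROOFS =====
theorem pv_join_shift (t : List String) (a : String) :
    List.foldl (fun r s => r ++ s) a t = a ++ List.foldl (fun r s => r ++ s) "" t := by
  induction t generalizing a with
  | nil => simp
  | cons v t ih => simp only [List.foldl_cons]; rw [ih, ih ("" ++ v)]; simp [String.append_assoc]

theorem pv_join_append (s t : List String) :
    String.join (s ++ t) = String.join s ++ String.join t := by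
  simp only [String.join, List.foldl_append]; rw [pv_join_shift]

theorem pv_join_single (s : String) : String.join [s] = s := by
  simp [String.join]

-- chars accumulator of the decode fold factors out
theorem pv_decode_acc (rs : List (List String)) (rem : Nat) (chars : List String) :
    (rs.foldl pvDecodeStep (rem, chars)).2
      = chars ++ (rs.foldl pvDecodeStep (rem, [])).2 := by
  induction rs generalizing rem chars with
  | nil => simp
  | cons o rs ih =>
    simp only [List.foldl_cons, pvDecodeStep]
    rw [ih (rem / o.length) (chars ++ [o.getD (rem % o.length) ""]),
      ih (rem / o.length) ([] ++ [o.getD (rem % o.length) ""])]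
    simp

-- the joined decode, recursion from the right
theorem pv_decode_snoc (os : List (List String)) (o : List String) (i : Nat) :
    String.join (((os ++ [o]).reverse.foldl pvDecodeStep (i, [])).2.reverse)
      = String.join ((os.reverse.foldl pvDecodeStep (i / o.length, [])).2.reverse)
          ++ o.getD (i % o.length) "" := by
  simp only [List.reverse_append, List.reverse_cons, List.reverse_nil, List.nil_append,
    List.singleton_append, List.foldl_cons]
  show String.join ((os.reverse.foldl pvDecodeStep (pvDecodeStep (i, []) o)).2.reverse) = _
  simp only [pvDecodeStep]
  rw [pv_decode_acc]
  simp [pv_join_append, pv_join_single]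

theorem pv_product_snoc (os : List (List String)) (o : List String) :
    pvProduct (os ++ [o]) = (pvProduct os).flatMap (fun t => o.map (fun x => t ++ [x])) := by
  induction os with
  | nil =>
    simp only [List.nil_append, pvProduct, List.flatMap_cons, List.flatMap_nil, List.append_nil]
    induction o with
    | nil => simp
    | cons x o iho => simp_all
  | cons l os ih =>
    simp only [List.cons_append, pvProduct, ih]
    simp [List.flatMap_assoc, List.map_flatMap, List.flatMap_map, List.map_map, Function.comp_def]

theorem pv_range_mul (P r : Nat) :
    List.range (P * r) = (List.range P).flatMap (fun q => (List.range r).map (fun m => q * r + m)) := by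
  induction P with
  | zero => simp
  | succ P ih =>
    rw [Nat.succ_mul, List.range_add, ih, List.range_succ]
    simp [Nat.add_comm]

theorem pv_foldl_mul (os : List (List String)) (a : Nat) :
    os.foldl (fun a o => a * o.length) a = a * (os.map List.length).prod := by
  induction os generalizing a with
  | nil => simp
  | cons o os ih => simp [ih, Nat.mul_assoc]

theorem pv_getD_map (o : List String) (f : String → String) :
    o.map f = (List.range o.length).map (fun m => f (o.getD m "")) := by
  apply List.ext_getElem
  · simp
  · intro i h1 h2
    simp only [List.getElem_map, List.getElem_range]
    rw [List.getD_eq_getElem]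

-- main lemma: mixed-radix decoding of 0..total-1 enumerates the product in order
theorem pv_main (opts : List (List String)) :
    (List.range ((opts.map List.length).prod)).map
        (fun i => String.join ((opts.reverse.foldl pvDecodeStep (i, [])).2.reverse))
      = (pvProduct opts).map String.join := by
  induction opts using List.reverseRecOn with
  | nil => simp [pvProduct, String.join]
  | append_singleton os o ih =>
    have hprod : ((os ++ [o]).map List.length).prod = (os.map List.length).prod * o.length := by
      simp
    have hjoin : ∀ t : List String, ∀ x : String, String.join (t ++ [x]) = String.join t ++ x := by
      intro t x; rw [pv_join_append, pv_join_single]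
    rw [pv_product_snoc, hprod, pv_range_mul, List.map_flatMap, List.map_flatMap]
    simp only [List.map_map, Function.comp_def]
    have hrhs : (pvProduct os).flatMap (fun t => o.map (fun x => String.join (t ++ [x])))
        = (List.range ((os.map List.length).prod)).flatMap
            (fun q => o.map (fun x =>
              String.join ((os.reverse.foldl pvDecodeStep (q, [])).2.reverse) ++ x)) := by
      have h1 : (pvProduct os).flatMap (fun t => o.map (fun x => String.join (t ++ [x])))
          = ((pvProduct os).map String.join).flatMap (fun s => o.map (fun x => s ++ x)) := by
        rw [List.flatMap_map]
        apply List.flatMap_congr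
        intro t _
        simp [hjoin]
      rw [h1, ← ih, List.flatMap_map]
    rw [hrhs]
    apply List.flatMap_congr
    intro q _
    rcases Nat.eq_zero_or_pos o.length with hr | hr
    · rw [List.length_eq_zero_iff] at hr
      simp [hr]
    · rw [pv_getD_map o (fun x => String.join ((os.reverse.foldl pvDecodeStep (q, [])).2.reverse) ++ x)]
      apply List.map_congr_left
      intro m hm
      rw [List.mem_range] at hm
      rw [pv_decode_snoc]
      have hq : q * o.length + m = m + q * o.length := by omega
      rw [hq, Nat.add_mul_div_right _ _ hr, Nat.div_eq_of_lt hm, Nat.zero_add,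
        Nat.add_mul_mod_self_right, Nat.mod_eq_of_lt hm]

-- ===== VERDICT (by name: the statement is the Claim_ definition above) =====
theorem create_itaiji_name_spec : Claim_equal_create_itaiji_name := by
  intro kaki itaiji _
  unfold Spec_create_itaiji_name
  simp only [create_itaiji_name, create_itaiji_name_alt, pv_foldl_mul, Nat.one_mul, pv_main]
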